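-- pv_equiv track=rewrite | github.com/MaticTonin/Faks-FMF | 2 LETNIK/Programiranje/Slovarji/usmerjeni_grafi.py | slovar_naslednikov
-- ===== SOURCE A (Python) =====
-- def slovar_naslednikov(seznam_povezav):
--     nasledniki=dict()
--     for key, value in seznam_povezav:
--         if key not in nasledniki:
--             nasledniki[key]=[]
--         nasledniki[key].append(value)
--     for key in nasledniki:
--         nasledniki[key].sort()
--     return nasledniki
-- ===== SOURCE B (Python) =====
-- def slovar_naslednikov(seznam_povezav):
--     # sort the edge list once by successor (stable), then group:
--     # each adjacency list is filled in already-sorted order.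
--     nasledniki = {key: [] for key, _ in seznam_povezav}
--     for key, value in sorted(seznam_povezav, key=lambda p: p[1]):
--         nasledniki[key].append(value)
--     return nasledniki
-- ===== Notes on version B (the rewrite author's own statement) =====
-- stated objective: alternative
-- what changed: Instead of grouping edges per key and then sorting each adjacency list, B pre-creates all keys, stably sorts the whole edge list by successor once, and fills the lists in one grouping pass so each list is born sorted.
import Mathlib
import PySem

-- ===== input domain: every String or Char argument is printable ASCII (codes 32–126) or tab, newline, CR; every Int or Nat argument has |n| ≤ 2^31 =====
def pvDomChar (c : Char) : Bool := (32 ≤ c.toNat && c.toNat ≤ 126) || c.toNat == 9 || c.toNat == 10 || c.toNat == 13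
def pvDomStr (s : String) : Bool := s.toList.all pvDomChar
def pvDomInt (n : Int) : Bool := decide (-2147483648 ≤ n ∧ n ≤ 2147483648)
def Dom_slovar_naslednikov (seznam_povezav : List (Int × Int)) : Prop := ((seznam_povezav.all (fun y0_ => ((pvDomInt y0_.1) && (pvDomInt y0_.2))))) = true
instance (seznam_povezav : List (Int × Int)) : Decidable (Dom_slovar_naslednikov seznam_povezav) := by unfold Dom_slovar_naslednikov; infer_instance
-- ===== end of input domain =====

-- B replaces A's "group edges per key, then sort each adjacency list" by "pre-create the
-- keys, stably sort the whole edge list by successor once, then fill the lists in one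
-- grouping pass" — a different decomposition of the same task (objective: alternative).

-- ===== PORT A =====
def slovar_naslednikov (seznam_povezav : List (Int × Int)) : List (Int × List Int) :=
  -- for key, value in seznam_povezav: if key not in nasledniki: nasledniki[key]=[]; nasledniki[key].append(value)
  let nasledniki : PySem.Dict Int (List Int) :=
    seznam_povezav.foldl (fun d p =>
      (if d.contains p.1 then d else d.insert p.1 ([] : List Int)).modify p.1 []
        (fun xs => xs ++ [p.2])) PySem.Dict.empty
  -- for key in nasledniki: nasledniki[key].sort()
  let nasledniki :=
    nasledniki.keys.foldl
      (fun d k => d.modify k [] (fun xs => PySem.List.sorted xs (fun x => x) false)) nasledniki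
  nasledniki.items

-- ===== PORT B =====
def slovar_naslednikov_alt (seznam_povezav : List (Int × Int)) : List (Int × List Int) :=
  -- nasledniki = {key: [] for key, _ in seznam_povezav}
  let nasledniki : PySem.Dict Int (List Int) :=
    seznam_povezav.foldl (fun d p => d.insert p.1 ([] : List Int)) PySem.Dict.empty
  -- for key, value in sorted(seznam_povezav, key=lambda p: p[1]): nasledniki[key].append(value)
  let nasledniki :=
    (PySem.List.sorted seznam_povezav (fun p => p.2) false).foldl
      (fun d p => d.modify p.1 [] (fun xs => xs ++ [p.2])) nasledniki
  nasledniki.items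

-- ===== PRECONDITION & SPEC =====
def Spec_slovar_naslednikov (seznam_povezav : List (Int × Int)) (out : List (Int × List Int)) : Prop := out = slovar_naslednikov_alt seznam_povezav
instance (seznam_povezav : List (Int × Int)) (out : List (Int × List Int)) : Decidable (Spec_slovar_naslednikov seznam_povezav out) := by unfold Spec_slovar_naslednikov; infer_instance

-- ===== CLAIM (what is proved, stated in full; the proofs are below) =====
def Claim_equal_slovar_naslednikov : Prop := ∀ (seznam_povezav : List (Int × Int)), Dom_slovar_naslednikov seznam_povezav → Spec_slovar_naslednikov seznam_povezav (slovar_naslednikov seznam_povezav)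

-- ===== LEMMAS AND PROOFS =====

-- A's loop body equals a plain modify-append step (the "create empty list first" branch is absorbed).
theorem pv_stepA (d : PySem.Dict Int (List Int)) (k v : Int) :
    (if d.contains k then d else d.insert k ([] : List Int)).modify k [] (fun xs => xs ++ [v])
      = d.modify k [] (fun xs => xs ++ [v]) := by
  by_cases h : d.contains k
  · simp [h]
  · have hc : d.contains k = false := by simpa using h
    have hm : ∀ (e : PySem.Dict Int (List Int)) (f : List Int → List Int),
        e.modify k [] f = e.insert k (f (e.getD k [])) := fun e f => PySem.Dict.ext_iff.mpr rfl
    simp only [hc, Bool.false_eq_true, ite_false]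
    rw [hm, hm, PySem.Dict.getD_insert_self, PySem.Dict.insert_insert_self,
        PySem.Dict.getD_of_not_contains d [] hc]

-- a Set.update that adds nothing new is the identity
theorem pv_update_absorb (s : PySem.Set Int) (xs : List Int) (h : ∀ x ∈ xs, x ∈ s) :
    PySem.Set.update s xs = s := by
  rw [PySem.Set.update_eq_append_filter]
  have hf : (PySem.Set.ofList xs).filter (fun y => !(PySem.Set.contains s y)) = [] := by
    rw [List.filter_eq_nil_iff]
    intro a ha
    simp only [Bool.not_eq_true', Bool.not_eq_false]
    simp
    exact h a ((PySem.Set.mem_ofList xs a).mp ha)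
  rw [hf, List.append_nil]

-- getD after the per-key sorting loop (keys pairwise distinct; each key touched once)
theorem pv_getD_foldl_sort (ks : List Int) (d : PySem.Dict Int (List Int))
    (f : List Int → List Int) (hnd : ks.Nodup) (c : Int) :
    (ks.foldl (fun d k => d.modify k [] f) d).getD c []
      = if c ∈ ks then f (d.getD c []) else d.getD c [] := by
  induction ks generalizing d with
  | nil => simp
  | cons k ks ih =>
    simp only [List.foldl_cons]
    rw [ih (d.modify k [] f) (List.nodup_cons.mp hnd).2]
    by_cases hmem : c ∈ ks
    · have hne : c ≠ k := fun he => (List.nodup_cons.mp hnd).1 (he ▸ hmem)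
      simp [hmem, PySem.Dict.getD_modify, hne]
    · by_cases hck : c = k
      · subst hck; simp [hmem]
      · simp [hmem, hck, PySem.Dict.getD_modify]

-- the all-values-[] dict comprehension
theorem pv_getD_foldl_insert_nil (l : List (Int × Int)) (d : PySem.Dict Int (List Int))
    (c : Int) (h : d.getD c [] = []) :
    (l.foldl (fun d p => d.insert p.1 ([] : List Int)) d).getD c [] = [] := by
  induction l generalizing d with
  | nil => simpa using h
  | cons p l ih =>
    simp only [List.foldl_cons]
    exact ih _ (by rw [PySem.Dict.getD_insert]; split_ifs <;> simp [h])

-- one stable insertion step of PySem.List.sorted, peeled off the right end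
theorem pv_sorted_append_singleton {α κ : Type} [LT κ] [DecidableLT κ] (l : List α) (x : α) (key : α → κ) :
    PySem.List.sorted (l ++ [x]) key false
      = PySem.List.insertBy (fun a b => decide (key a < key b)) x (PySem.List.sorted l key false) := by
  rw [PySem.List.sorted_eq_foldl_insertBy, PySem.List.sorted_eq_foldl_insertBy, List.foldl_append,
      List.foldl_cons, List.foldl_nil]

-- filtering commutes with a single stable insertion into a key-sorted list
theorem pv_filter_insertBy (key : (Int × Int) → Int) (q : (Int × Int) → Bool)
    (x : Int × Int) (ys : List (Int × Int))
    (hs : ys.Pairwise (fun a b => key a ≤ key b)) :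
    (PySem.List.insertBy (fun a b => decide (key a < key b)) x ys).filter q
      = if q x then PySem.List.insertBy (fun a b => decide (key a < key b)) x (ys.filter q)
        else ys.filter q := by
  induction ys with
  | nil => simp [PySem.List.insertBy]; split_ifs with h <;> simp [h]
  | cons y ys ih =>
    rcases List.pairwise_cons.mp hs with ⟨hy, hys⟩
    by_cases hb : key x < key y
    · -- inserted before y
      simp only [PySem.List.insertBy, decide_eq_true_eq, hb, if_true]
      by_cases hqx : q x
      · by_cases hqy : q y
        · simp [List.filter, hqx, hqy, PySem.List.insertBy, hb]
        · -- x also heads the filtered list: any kept z comes after y, so key x < key y ≤ key z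
          simp only [List.filter_cons, hqx, hqy, if_true, Bool.false_eq_true, if_false]
          cases hf : ys.filter q with
          | nil => simp [PySem.List.insertBy]
          | cons z zs =>
            have hz : z ∈ ys := List.mem_of_mem_filter (hf ▸ List.mem_cons_self ..)
            have : key x < key z := lt_of_lt_of_le hb (hy z hz)
            simp [PySem.List.insertBy, this]
      · simp [List.filter_cons, hqx]
    · -- y stays in front
      simp only [PySem.List.insertBy, decide_eq_true_eq, hb, if_false]
      by_cases hqy : q y
      · simp only [List.filter_cons, hqy, if_true, ih hys]
        by_cases hqx : q x
        · simp [hqx, PySem.List.insertBy, hb]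
        · simp [hqx]
      · simp only [List.filter_cons, hqy, Bool.false_eq_true, if_false, ih hys]

-- filtering commutes with the stable sort
theorem pv_filter_sorted (l : List (Int × Int)) (key : (Int × Int) → Int)
    (q : (Int × Int) → Bool) :
    (PySem.List.sorted l key false).filter q = PySem.List.sorted (l.filter q) key false := by
  induction l using List.reverseRecOn with
  | nil => simp [PySem.List.sorted]
  | append_singleton l x ih =>
    rw [pv_sorted_append_singleton,
        pv_filter_insertBy key q x _ (PySem.List.sorted_pairwise l key),
        List.filter_append]
    by_cases hq : q x
    · rw [ih]
      simp only [hq, if_true, List.filter_cons, List.filter_nil]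
      rw [pv_sorted_append_singleton]
    · simp [hq, ih]

-- projecting the sort key out of a stable insertion
theorem pv_map_insertBy (x : Int × Int) (ys : List (Int × Int)) :
    (PySem.List.insertBy (fun a b => decide (a.2 < b.2)) x ys).map (fun p => p.2)
      = PySem.List.insertBy (fun a b => decide (a < b)) x.2 (ys.map (fun p => p.2)) := by
  induction ys with
  | nil => simp [PySem.List.insertBy]
  | cons y ys ih =>
    by_cases hb : x.2 < y.2
    · simp [PySem.List.insertBy, hb]
    · simp [PySem.List.insertBy, hb, ih]

-- projecting the sort key out of the stable sort
theorem pv_map_sorted (m : List (Int × Int)) :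
    (PySem.List.sorted m (fun p => p.2) false).map (fun p => p.2)
      = PySem.List.sorted (m.map (fun p => p.2)) (fun x => x) false := by
  induction m using List.reverseRecOn with
  | nil => simp [PySem.List.sorted]
  | append_singleton m x ih =>
    rw [pv_sorted_append_singleton, pv_map_insertBy, ih, List.map_append]
    simp only [List.map_cons, List.map_nil]
    rw [pv_sorted_append_singleton]

-- ===== VERDICT (by name: the statement is the Claim_ definition above) =====
theorem slovar_naslednikov_spec : Claim_equal_slovar_naslednikov := by
  intro l _
  unfold Spec_slovar_naslednikov slovar_naslednikov slovar_naslednikov_alt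
  simp only []
  -- A's first loop is a plain modify-append fold
  rw [PySem.List.foldl_congr_mem
      (l := l) (init := (PySem.Dict.empty : PySem.Dict Int (List Int)))
      (f := fun (d : PySem.Dict Int (List Int)) (p : Int × Int) =>
        (if d.contains p.1 then d else d.insert p.1 ([] : List Int)).modify p.1 []
          (fun xs => xs ++ [p.2]))
      (g := fun (d : PySem.Dict Int (List Int)) (p : Int × Int) =>
        d.modify p.1 [] (fun xs => xs ++ [p.2]))
      (fun d p _ => pv_stepA d p.1 p.2)]
  set dA : PySem.Dict Int (List Int) :=
    l.foldl (fun d p => d.modify p.1 [] (fun xs => xs ++ [p.2])) PySem.Dict.empty with hdA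
  set d0 : PySem.Dict Int (List Int) :=
    l.foldl (fun d p => d.insert p.1 ([] : List Int)) PySem.Dict.empty with hd0
  set t := PySem.List.sorted l (fun p => p.2) false with ht
  set dA2 := dA.keys.foldl
      (fun d k => d.modify k [] (fun xs => PySem.List.sorted xs (fun x => x) false)) dA with hdA2
  set dB := t.foldl (fun d p => d.modify p.1 [] (fun xs => xs ++ [p.2])) d0 with hdB
  -- keys
  have nodA : dA.keys.Nodup :=
    PySem.Dict.nodup_keys_foldl_insert_key l Prod.fst _ PySem.Dict.empty PySem.Dict.nodup_keys_empty
  have hkA : dA.keys = PySem.Set.ofList (l.map (fun p => p.1)) := by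
    rw [hdA, PySem.Dict.keys_foldl_modify_key]
    simp [PySem.Dict.keys_empty, PySem.Set.update_nil_left]
  have hkA2 : dA2.keys = dA.keys := by
    rw [hdA2, PySem.Dict.keys_foldl_modify]
    exact pv_update_absorb _ _ (fun x hx => hx)
  have nodA2 : dA2.keys.Nodup := hkA2 ▸ nodA
  have hk0 : d0.keys = PySem.Set.ofList (l.map (fun p => p.1)) := by
    rw [hd0, PySem.Dict.keys_foldl_insert_key]
    simp [PySem.Dict.keys_empty, PySem.Set.update_nil_left]
  have nod0 : d0.keys.Nodup :=
    PySem.Dict.nodup_keys_foldl_insert_key l Prod.fst _ PySem.Dict.empty PySem.Dict.nodup_keys_empty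
  have hkB : dB.keys = d0.keys := by
    rw [hdB, PySem.Dict.keys_foldl_modify_key]
    refine pv_update_absorb _ _ (fun x hx => ?_)
    rcases List.mem_map.mp hx with ⟨p, hp, rfl⟩
    rw [ht] at hp
    have hpl : p ∈ l := (PySem.List.mem_sorted l (fun p => p.2) false p).mp hp
    rw [hk0]
    exact (PySem.Set.mem_ofList _ _).mpr (List.mem_map.mpr ⟨p, hpl, rfl⟩)
  have nodB : dB.keys.Nodup := hkB ▸ nod0
  -- items as maps over the (identical) key lists
  rw [PySem.Dict.items_eq_map_keys dA2 nodA2 [], PySem.Dict.items_eq_map_keys dB nodB [],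
      hkA2, hkB, hkA, hk0]
  apply List.map_congr_left
  intro c hc
  have hcK : c ∈ dA.keys := by rw [hkA]; exact hc
  -- the two per-key values
  have h0 : d0.getD c [] = [] := by
    rw [hd0]; exact pv_getD_foldl_insert_nil l PySem.Dict.empty c (by simp)
  have hA2 : dA2.getD c [] = PySem.List.sorted (dA.getD c []) (fun x => x) false := by
    rw [hdA2, pv_getD_foldl_sort _ _ _ nodA c, if_pos hcK]
  have hAval : dA.getD c [] = (l.filter (fun p => p.1 == c)).map (fun p => p.2) := by
    rw [hdA, PySem.Dict.getD_foldl_modify_append]; simp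
  have hBval : dB.getD c [] = (t.filter (fun p => p.1 == c)).map (fun p => p.2) := by
    rw [hdB, PySem.Dict.getD_foldl_modify_append, h0]; simp
  rw [hA2, hAval, hBval, ht, pv_filter_sorted l (fun p => p.2) (fun p => p.1 == c),
      pv_map_sorted]
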